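-- pv_equiv track=rewrite | github.com/becoding96/BOJ | programmers/23/6/150367.py | to_perfect
-- ===== SOURCE A (Python) =====
-- def to_perfect(b):
--     b_len = len(b)
--     t_len = 1
--     weight = 1
--
--     while t_len < b_len:
--         weight *= 2
--         t_len += weight
--
--     return '0' * (t_len - b_len) + b
-- ===== SOURCE B (Python) =====
-- def to_perfect(b):
--     k = max(1, len(b).bit_length())
--     t_len = (1 << k) - 1
--     return '0' * (t_len - len(b)) + b
-- ===== Notes on version B (the rewrite author's own statement) =====
-- stated objective: simpler
-- what changed: Replaced the doubling accumulation loop that searches for the smallest 2^k-1 >= len(b) with a closed-form arithmetic formula using len(b).bit_length() (clamped to at least 1).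
import Mathlib
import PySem

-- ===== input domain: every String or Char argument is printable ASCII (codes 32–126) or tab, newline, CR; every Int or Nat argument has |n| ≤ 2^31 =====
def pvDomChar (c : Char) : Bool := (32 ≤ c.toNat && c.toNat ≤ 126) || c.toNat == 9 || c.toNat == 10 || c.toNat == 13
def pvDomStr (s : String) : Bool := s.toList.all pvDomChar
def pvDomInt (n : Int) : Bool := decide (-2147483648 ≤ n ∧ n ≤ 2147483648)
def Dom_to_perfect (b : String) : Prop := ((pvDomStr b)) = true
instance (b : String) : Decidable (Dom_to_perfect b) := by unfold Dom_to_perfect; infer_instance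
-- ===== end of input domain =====

-- B replaces A's doubling search loop for the smallest 2^k-1 ≥ len(b) with a closed-form
-- bit_length formula (objective: simpler).


-- ===== PORT A =====
-- the while loop of A: `while t_len < b_len: weight *= 2; t_len += weight`
-- (the positivity argument hw only justifies termination; it carries no data)
def to_perfect_loop (b_len t_len weight : Nat) (hw : 1 ≤ weight) : Nat :=
  if t_len < b_len then
    to_perfect_loop b_len (t_len + weight * 2) (weight * 2) (by omega)
  else t_len
termination_by b_len - t_len
decreasing_by omega

def to_perfect (b : String) : String :=
  let b_len := b.toList.length
  let t_len := to_perfect_loop b_len 1 1 (Nat.le_refl 1)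
  String.mk (List.replicate (t_len - b_len) '0' ++ b.toList)

-- ===== PORT B =====
def to_perfect_alt (b : String) : String :=
  let n := b.toList.length
  let k := max 1 (PySem.Int.bitLength (n : Int))
  let t_len := 2 ^ k - 1
  String.mk (List.replicate (t_len - n) '0' ++ b.toList)

-- ===== PRECONDITION & SPEC =====
def Spec_to_perfect (b : String) (out : String) : Prop := out = to_perfect_alt b
instance (b : String) (out : String) : Decidable (Spec_to_perfect b out) := by unfold Spec_to_perfect; infer_instance

-- ===== CLAIM (what is proved, stated in full; the proofs are below) =====
def Claim_equal_to_perfect : Prop := ∀ (b : String), Dom_to_perfect b → Spec_to_perfect b (to_perfect b)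

-- ===== LEMMAS AND PROOFS =====

-- K n = max 1 (bit_length n), the exponent B computes
def pvK (n : Nat) : Nat := max 1 (PySem.Int.bitLength (n : Int))

lemma pvK_lt : ∀ n : Nat, n < 2 ^ pvK n := by
  intro n
  have h := PySem.Int.lt_two_pow_bitLength (n : Int)
  simp only [Int.natAbs_natCast] at h
  exact lt_of_lt_of_le h (Nat.pow_le_pow_right (by omega) (le_max_right _ _))

lemma pvK_le (n j : Nat) (hj : 1 ≤ j) (h : n < 2 ^ j) : pvK n ≤ j := by
  unfold pvK
  rcases Nat.eq_zero_or_pos n with h0 | h0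
  · subst h0; simp [PySem.Int.bitLength_zero, hj]
  · have hne : (n : Int) ≠ 0 := by exact_mod_cast h0.ne'
    have hle := PySem.Int.two_pow_bitLength_le (n : Int) hne
    simp only [Int.natAbs_natCast] at hle
    -- if j < bitLength n then 2^j ≤ 2^(bl-1) ≤ n, contradiction
    by_contra hc
    push_neg at hc
    have hbl : j < PySem.Int.bitLength (n : Int) := by omega
    have h2 : 2 ^ j ≤ 2 ^ (PySem.Int.bitLength (n : Int) - 1) :=
      Nat.pow_le_pow_right (by omega) (by omega)
    omega

lemma loop_congr (b t t' w w' : Nat) (h : 1 ≤ w) (h' : 1 ≤ w')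
    (ht : t = t') (hww : w = w') :
    to_perfect_loop b t w h = to_perfect_loop b t' w' h' := by
  subst ht; subst hww; rfl

lemma loop_eq (n : Nat) : ∀ (j : Nat) (hj : 1 ≤ j) (hle : j ≤ pvK n),
    to_perfect_loop n (2 ^ j - 1) (2 ^ (j - 1)) (Nat.one_le_two_pow) = 2 ^ pvK n - 1 := by
  intro j
  induction hn : pvK n - j generalizing j with
  | zero =>
    intro hj hle
    have hjk : j = pvK n := by omega
    subst hjk
    have hlt := pvK_lt n
    have hnot : ¬ (2 ^ pvK n - 1 < n) := by omega
    rw [to_perfect_loop, if_neg hnot]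
  | succ m ih =>
    intro hj hle
    have hpos : 0 < 2 ^ j := Nat.pow_pos (by omega)
    rw [to_perfect_loop]
    by_cases hlt : 2 ^ j - 1 < n
    · rw [if_pos hlt]
      have hpow : 2 ^ (j - 1) * 2 = 2 ^ j := by
        rw [← Nat.pow_succ]; congr 1; omega
      have hK : j + 1 ≤ pvK n := by
        by_contra hc
        push_neg at hc
        have hKj : pvK n ≤ j := by omega
        have hmono : 2 ^ pvK n ≤ 2 ^ j := Nat.pow_le_pow_right (by omega) hKj
        have hlt2 := pvK_lt n
        omega
      have hrec := ih (j + 1) (by omega) (by omega) (by omega)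
      rw [← hrec]
      apply loop_congr
      · simp only [Nat.pow_succ]; omega
      · simp only [Nat.add_sub_cancel]; rw [hpow]
    · rw [if_neg hlt]
      have hKj : pvK n ≤ j := pvK_le n j hj (by omega)
      have hmono : 2 ^ pvK n ≤ 2 ^ j := Nat.pow_le_pow_right (by omega) hKj
      have hmono2 : 2 ^ j ≤ 2 ^ pvK n := Nat.pow_le_pow_right (by omega) hle
      omega

lemma loop_main (n : Nat) : to_perfect_loop n 1 1 (Nat.le_refl 1) = 2 ^ pvK n - 1 := by
  have h := loop_eq n 1 (Nat.le_refl 1) (le_max_left _ _)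
  norm_num at h
  convert h using 2

-- ===== VERDICT (by name: the statement is the Claim_ definition above) =====
theorem to_perfect_spec : Claim_equal_to_perfect := by
  intro b _
  unfold Spec_to_perfect to_perfect to_perfect_alt
  simp only [loop_main]
  rfl
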